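-- pv_equiv track=rewrite | github.com/mastergap/hackerrank | bin/Strings.py | lex_smallest_string
-- ===== SOURCE A (Python) =====
-- from collections import Counter
--
-- def lex_smallest_string(s):
--     """
--     :type s: str
--     :rtype: str
--     """
--     char_counter = Counter(s)
--     # "".join(item[0] for item in Counter.items() for x in range(item[1])])
--     smallest_s = ""
--     for item in char_counter.items():
--         for _ in range(item[1] // 2):
--             smallest_s += item[0]
--
--     smallest_s = "".join(sorted(list(smallest_s)))
--
--     return smallest_s
-- ===== SOURCE B (Python) =====
-- def lex_smallest_string(s):
--     out = []
--     cur = None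
--     n = 0
--     for c in sorted(s):
--         if c == cur:
--             n += 1
--         else:
--             if cur is not None:
--                 out.append(cur * (n // 2))
--             cur = c
--             n = 1
--     if cur is not None:
--         out.append(cur * (n // 2))
--     return "".join(out)
-- ===== Notes on version B (the rewrite author's own statement) =====
-- stated objective: alternative
-- what changed: Replaces Counter-table building plus expand-then-sort with a single sort followed by one linear run-length scan that emits each run's char floor(run/2) times.
import Mathlib
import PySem

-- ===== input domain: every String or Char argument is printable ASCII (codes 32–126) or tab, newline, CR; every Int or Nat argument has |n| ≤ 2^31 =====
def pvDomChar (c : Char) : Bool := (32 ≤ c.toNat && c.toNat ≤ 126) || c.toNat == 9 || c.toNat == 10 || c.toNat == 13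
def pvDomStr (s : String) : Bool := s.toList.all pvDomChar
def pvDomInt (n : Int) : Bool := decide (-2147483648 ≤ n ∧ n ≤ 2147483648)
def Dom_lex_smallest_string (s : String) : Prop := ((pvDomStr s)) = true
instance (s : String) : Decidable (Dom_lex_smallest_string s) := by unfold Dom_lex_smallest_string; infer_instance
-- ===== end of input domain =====

-- B replaces A's Counter table and expand-then-sort with one sort followed by a linear
-- run-length scan (same asymptotic cost; a different decomposition).

-- ===== PORT A =====
def lex_smallest_string (s : String) : String :=
  let char_counter := PySem.Dict.counter s.toList
  let smallest_s : List Char := char_counter.items.foldl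
    (fun acc item =>
      (PySem.List.pyRange 0 (PySem.Int.floordiv item.2 2) 1).foldl
        (fun a _ => a ++ [item.1]) acc) []
  String.ofList (PySem.List.sorted smallest_s (fun x => x) false)

-- ===== PORT B =====
-- the final flush 'out.append(cur * (n // 2))' (nothing when cur is None)
def altFlush (cur? : Option Char) (n : Nat) : List Char :=
  match cur? with
  | none => []
  | some cur => List.replicate (n / 2) cur

-- the run-length scan loop of Source B: state = (current char, run length, chunks emitted so far)
def altLoop : List Char → Option Char → Nat → List Char → List Char
  | [], cur?, n, out => out ++ altFlush cur? n
  | c :: rest, cur?, n, out =>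
    if some c = cur? then altLoop rest cur? (n + 1) out
    else altLoop rest (some c) 1 (out ++ altFlush cur? n)

def lex_smallest_string_alt (s : String) : String :=
  String.ofList (altLoop (PySem.List.sorted s.toList (fun x => x) false) none 0 [])

-- ===== PRECONDITION & SPEC =====
def Spec_lex_smallest_string (s : String) (out : String) : Prop := out = lex_smallest_string_alt s
instance (s : String) (out : String) : Decidable (Spec_lex_smallest_string s out) := by unfold Spec_lex_smallest_string; infer_instance

-- ===== CLAIM (what is proved, stated in full; the proofs are below) =====
def Claim_equal_lex_smallest_string : Prop := ∀ (s : String), Dom_lex_smallest_string s → Spec_lex_smallest_string s (lex_smallest_string s)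

-- ===== LEMMAS AND PROOFS =====

-- a fold that appends one fixed char per element is an appended replicate
lemma foldl_const_append {β : Type} (c : Char) :
    ∀ (l : List β) (acc : List Char),
      l.foldl (fun a _ => a ++ [c]) acc = acc ++ List.replicate l.length c
  | [], acc => by simp
  | _ :: t, acc => by
      simp [List.foldl_cons, foldl_const_append c t, List.replicate_succ, List.append_assoc]

-- A's inner 'for _ in range(n // 2)' loop
lemma inner_loop_eq (n : Nat) (c : Char) (acc : List Char) :
    (PySem.List.pyRange 0 (PySem.Int.floordiv (n : Int) 2) 1).foldl
      (fun a _ => a ++ [c]) acc = acc ++ List.replicate (n / 2) c := by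
  have h2 : PySem.Int.floordiv (n : Int) 2 = ((n / 2 : Nat) : Int) := by
    exact_mod_cast PySem.Int.floordiv_natCast n 2
  have hlen : (PySem.List.pyRange 0 (PySem.Int.floordiv (n : Int) 2) 1).length = n / 2 := by
    rw [h2, PySem.List.length_pyRange_one]; omega
  rw [foldl_const_append, hlen]

-- count of a flatMap of replicates over a duplicate-free key list
lemma count_flatMap_replicate (l : List Char) :
    ∀ (ks : List Char), ks.Nodup → ∀ x : Char,
      (ks.flatMap (fun k => List.replicate (l.count k / 2) k)).count x
        = if x ∈ ks then l.count x / 2 else 0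
  | [], _, x => by simp
  | k :: t, hnd, x => by
      have hnd' := hnd
      rw [List.nodup_cons] at hnd'
      simp only [List.flatMap_cons, List.count_append, List.count_replicate,
        count_flatMap_replicate l t hnd'.2 x, List.mem_cons]
      by_cases hxk : x = k
      · subst hxk
        simp [hnd'.1]
      · simp [hxk, Ne.symm hxk]

-- the un-sorted string A builds has, for every char, half that char's count in s
-- A's outer items loop, once the counter's items are known
lemma outer_loop_eq (l : List Char) :
    ∀ (ks : List Char) (acc : List Char),
      ks.foldl (fun acc k =>
        (PySem.List.pyRange 0 (PySem.Int.floordiv ((l.count k : Nat) : Int) 2) 1).foldl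
          (fun a _ => a ++ [k]) acc) acc
      = acc ++ ks.flatMap (fun k => List.replicate (l.count k / 2) k)
  | [], acc => by simp
  | k :: t, acc => by
      simp only [List.foldl_cons, List.flatMap_cons]
      rw [inner_loop_eq (l.count k) k acc, outer_loop_eq l t, List.append_assoc]

-- the un-sorted string A builds has, for every char, half that char's count in s
lemma countA (l : List Char) (x : Char) :
    ((PySem.Dict.counter l).items.foldl
      (fun acc item =>
        (PySem.List.pyRange 0 (PySem.Int.floordiv item.2 2) 1).foldl
          (fun a _ => a ++ [item.1]) acc) []).count x = l.count x / 2 := by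
  rw [PySem.Dict.items_counter, List.foldl_map]
  show ((PySem.Set.ofList l).foldl (fun acc k =>
        (PySem.List.pyRange 0 (PySem.Int.floordiv ((l.count k : Nat) : Int) 2) 1).foldl
          (fun a _ => a ++ [k]) acc) []).count x = l.count x / 2
  rw [outer_loop_eq l (PySem.Set.ofList l) [], List.nil_append,
    count_flatMap_replicate l _ (PySem.Set.nodup_ofList l) x]
  by_cases hx : x ∈ l
  · simp [PySem.Set.mem_ofList, hx]
  · simp [PySem.Set.mem_ofList, hx, List.count_eq_zero_of_not_mem hx]

-- the output accumulator of the scan only ever grows on the right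
lemma altLoop_out :
    ∀ (xs : List Char) (cur? : Option Char) (n : Nat) (out : List Char),
      altLoop xs cur? n out = out ++ altLoop xs cur? n []
  | [], cur?, n, out => by simp [altLoop]
  | c :: rest, cur?, n, out => by
      by_cases h : some c = cur?
      · simp only [altLoop, if_pos h]
        exact altLoop_out rest cur? (n + 1) out
      · simp only [altLoop, if_neg h, List.nil_append]
        rw [altLoop_out rest (some c) 1 (out ++ altFlush cur? n),
            altLoop_out rest (some c) 1 (altFlush cur? n), List.append_assoc]

-- counts emitted by the scan over a sorted suffix whose elements all dominate cur
lemma count_altLoop :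
    ∀ (xs : List Char) (cur : Char) (n : Nat) (x : Char),
      xs.Pairwise (· ≤ ·) → (∀ y ∈ xs, cur ≤ y) →
      (altLoop xs (some cur) n []).count x
        = if x = cur then (n + xs.count cur) / 2 else xs.count x / 2
  | [], cur, n, x, _, _ => by
      simp only [altLoop, List.nil_append, altFlush, List.count_replicate, List.count_nil]
      by_cases hx : x = cur
      · subst hx; simp
      · simp [hx, Ne.symm hx]
  | c :: rest, cur, n, x, hp, hge => by
      have hp' := (List.pairwise_cons.mp hp)
      by_cases hc : c = cur
      · subst hc
        have hstep : altLoop (c :: rest) (some c) n [] = altLoop rest (some c) (n + 1) [] := by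
          simp [altLoop]
        rw [hstep, count_altLoop rest c (n + 1) x hp'.2 hp'.1]
        by_cases hx : x = c
        · subst hx
          simp
          omega
        · simp [hx, Ne.symm hx]
      · have hcur_lt : cur < c := lt_of_le_of_ne (hge c (by simp)) (Ne.symm hc)
        have hcur_not : cur ∉ rest := fun hmem =>
          absurd (hp'.1 cur hmem) (not_le_of_gt hcur_lt)
        have hne : some c ≠ some cur := by simpa using hc
        simp only [altLoop, if_neg hne, altFlush, List.nil_append]
        rw [altLoop_out rest (some c) 1 (List.replicate (n / 2) cur)]
        rw [List.count_append, List.count_replicate,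
          count_altLoop rest c 1 x hp'.2 hp'.1]
        by_cases hx : x = cur
        · subst hx
          have h0 : rest.count x = 0 := List.count_eq_zero_of_not_mem hcur_not
          have hxc : x ≠ c := fun h => hc h.symm
          simp [hxc, Ne.symm hxc, h0]
        · by_cases hxc : x = c
          · subst hxc
            simp [hx, Ne.symm hx]
            omega
          · simp [hx, Ne.symm hx, hxc, Ne.symm hxc]

-- the scan's output is sorted and dominated below by cur
lemma sorted_altLoop :
    ∀ (xs : List Char) (cur : Char) (n : Nat),
      xs.Pairwise (· ≤ ·) → (∀ y ∈ xs, cur ≤ y) →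
      (altLoop xs (some cur) n []).Pairwise (· ≤ ·) ∧
        ∀ z ∈ altLoop xs (some cur) n [], cur ≤ z
  | [], cur, n, _, _ => by
      constructor
      · simp only [altLoop, List.nil_append, altFlush]
        exact List.pairwise_replicate.mpr (Or.inr le_rfl)
      · intro z hz
        simp only [altLoop, List.nil_append, altFlush] at hz
        rw [List.eq_of_mem_replicate hz]
  | c :: rest, cur, n, hp, hge => by
      have hp' := List.pairwise_cons.mp hp
      by_cases hc : c = cur
      · subst hc
        have hstep : altLoop (c :: rest) (some c) n [] = altLoop rest (some c) (n + 1) [] := by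
          simp [altLoop]
        rw [hstep]
        exact sorted_altLoop rest c (n + 1) hp'.2 hp'.1
      · have hcur_le : cur ≤ c := hge c (by simp)
        have hne : some c ≠ some cur := by simpa using hc
        have ih := sorted_altLoop rest c 1 hp'.2 hp'.1
        simp only [altLoop, if_neg hne, altFlush, List.nil_append]
        rw [altLoop_out rest (some c) 1 (List.replicate (n / 2) cur)]
        constructor
        · apply List.pairwise_append.mpr
          refine ⟨List.pairwise_replicate.mpr (Or.inr le_rfl), ih.1, ?_⟩
          intro a ha b hb
          rw [List.eq_of_mem_replicate ha]
          exact le_trans hcur_le (ih.2 b hb)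
        · intro z hz
          rcases List.mem_append.mp hz with h | h
          · rw [List.eq_of_mem_replicate h]
          · exact le_trans hcur_le (ih.2 z h)

-- top-level form of the scan on a sorted list
lemma alt_top (xs : List Char) (hp : xs.Pairwise (· ≤ ·)) :
    (∀ x, (altLoop xs none 0 []).count x = xs.count x / 2) ∧
      (altLoop xs none 0 []).Pairwise (· ≤ ·) := by
  cases xs with
  | nil => simp [altLoop, altFlush]
  | cons c rest =>
      have hp' := List.pairwise_cons.mp hp
      have hstep : altLoop (c :: rest) none 0 [] = altLoop rest (some c) 1 [] := by
        simp [altLoop, altFlush]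
      rw [hstep]
      constructor
      · intro x
        rw [count_altLoop rest c 1 x hp'.2 hp'.1]
        by_cases hx : x = c
        · subst hx; simp; omega
        · simp [hx, Ne.symm hx]
      · exact (sorted_altLoop rest c 1 hp'.2 hp'.1).1

-- ===== VERDICT (by name: the statement is the Claim_ definition above) =====
theorem lex_smallest_string_spec : Claim_equal_lex_smallest_string := by
  intro s _
  unfold Spec_lex_smallest_string lex_smallest_string lex_smallest_string_alt
  have hslp : (PySem.List.sorted s.toList (fun x => x) false).Pairwise (· ≤ ·) := by
    simpa using PySem.List.sorted_pairwise s.toList (fun x => x)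
  obtain ⟨hcount, hpw⟩ := alt_top _ hslp
  have hperm : (altLoop (PySem.List.sorted s.toList (fun x => x) false) none 0 []).Perm
      ((PySem.Dict.counter s.toList).items.foldl
        (fun acc item =>
          (PySem.List.pyRange 0 (PySem.Int.floordiv item.2 2) 1).foldl
            (fun a _ => a ++ [item.1]) acc) []) := by
    rw [List.perm_iff_count]
    intro x
    rw [hcount x, countA s.toList x,
      (PySem.List.sorted_perm s.toList (fun x => x) false).count_eq x]
  have hkey := PySem.List.sorted_id_eq_of_perm_of_pairwise _ _ hperm hpw
  show String.ofList (PySem.List.sorted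
      ((PySem.Dict.counter s.toList).items.foldl
        (fun acc item =>
          (PySem.List.pyRange 0 (PySem.Int.floordiv item.2 2) 1).foldl
            (fun a _ => a ++ [item.1]) acc) []) (fun x => x) false)
    = String.ofList (altLoop (PySem.List.sorted s.toList (fun x => x) false) none 0 [])
  rw [hkey]
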